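-- pv_equiv track=rewrite | github.com/Kppro/AutoReviewBot | reviewer.py | filter_excluded_files
-- ===== SOURCE A (Python) =====
-- def filter_excluded_files(diff: str, excluded_exts) -> str:
--     """
--     Parses the diff in chunks. If a chunk involves a file with an excluded
--     extension, that chunk is omitted entirely.
--     """
--     if not diff.strip():
--         return diff
--
--     lines = diff.splitlines(keepends=False)
--     kept_chunks = []
--     current_chunk_lines = []
--     skip_current_chunk = False
--
--     diff_header_prefix = "diff --git "
--
--     def finalize_chunk():
--         """Helper to finalize a chunk if we're not skipping it."""
--         if not skip_current_chunk and current_chunk_lines: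
--             kept_chunks.extend(current_chunk_lines)
--
--     for line in lines:
--         if line.startswith(diff_header_prefix):
--             # finalize the current chunk
--             finalize_chunk()
--             current_chunk_lines = []
--             skip_current_chunk = False
--
--             # The line looks like: "diff --git a/path b/path"
--             parts = line.split()
--             if len(parts) >= 4:
--                 file_a = parts[2][2:]  # remove the 'a/' prefix
--                 file_b = parts[3][2:]  # remove the 'b/' prefix
--
--                 # Check if extension is in the excluded list
--                 for ext in excluded_exts:
--                     if file_a.endswith(ext) or file_b.endswith(ext):
--                         skip_current_chunk = True
--                         break
--
--             # start the new chunk lines with the diff header line (even if skipping)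
--             current_chunk_lines = [line]
--         else:
--             # normal line within the chunk
--             current_chunk_lines.append(line)
--
--     # finalize the last chunk
--     finalize_chunk()
--
--     # reassemble
--     return "\n".join(kept_chunks) + "\n"
-- ===== SOURCE B (Python) =====
-- def _excluded(line, excluded_exts):
--     parts = line.split()
--     if len(parts) < 4:
--         return False
--     file_a = parts[2][2:]
--     file_b = parts[3][2:]
--     return any(file_a.endswith(ext) or file_b.endswith(ext) for ext in excluded_exts)
--
--
-- def _filter(lines, excluded_exts, keeping):
--     if not lines:
--         return []
--     line, rest = lines[0], lines[1:]
--     if line.startswith("diff --git "):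
--         keeping = not _excluded(line, excluded_exts)
--     return ([line] if keeping else []) + _filter(rest, excluded_exts, keeping)
--
--
-- def filter_excluded_files(diff: str, excluded_exts) -> str:
--     """Streams lines with a keep/skip flag instead of buffering chunks."""
--     if not diff.strip():
--         return diff
--     return "\n".join(_filter(diff.splitlines(), excluded_exts, True)) + "\n"
-- ===== Notes on version B (the rewrite author's own statement) =====
-- stated objective: simpler
-- what changed: Replaces A's chunk-buffering loop (current-chunk list, skip flag, finalize helper) with a streaming recursion that emits or drops each line immediately based on a keep flag updated at each header line.
import Mathlib
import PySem

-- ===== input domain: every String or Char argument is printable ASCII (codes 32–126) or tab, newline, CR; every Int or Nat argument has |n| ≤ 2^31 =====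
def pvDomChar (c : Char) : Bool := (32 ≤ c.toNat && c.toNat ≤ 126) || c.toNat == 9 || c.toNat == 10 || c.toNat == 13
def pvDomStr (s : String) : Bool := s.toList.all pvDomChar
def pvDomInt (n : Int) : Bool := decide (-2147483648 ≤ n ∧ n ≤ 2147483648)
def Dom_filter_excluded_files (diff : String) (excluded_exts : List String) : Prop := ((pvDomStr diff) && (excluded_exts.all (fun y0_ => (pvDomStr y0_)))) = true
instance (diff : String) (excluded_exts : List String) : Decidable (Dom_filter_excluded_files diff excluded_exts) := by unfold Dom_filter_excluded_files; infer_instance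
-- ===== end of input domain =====

-- ===== PORT A =====
-- B changes A's chunk-buffering decomposition into a streaming keep-flag recursion (objective: simpler); return value only.
def pvHeader : String := "diff --git "

def pvSkipA (line : String) (excluded_exts : List String) : Bool :=
  let parts := PySem.Str.split₀ line
  if parts.length ≥ 4 then
    let file_a := PySem.Str.slice ((PySem.List.pyGet? parts 2).getD "") (some 2) none
    let file_b := PySem.Str.slice ((PySem.List.pyGet? parts 3).getD "") (some 2) none
    excluded_exts.foldl (fun sk ext => sk || (PySem.Str.endswith file_a ext || PySem.Str.endswith file_b ext)) false
  else false

def pvFinalize : List String × List String × Bool → List String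
  | (kept, cur, skip) => if !skip && !cur.isEmpty then kept ++ cur else kept

def pvStepA (excluded_exts : List String) (st : List String × List String × Bool) (line : String) : List String × List String × Bool :=
  let (kept, cur, skip) := st
  if PySem.Str.startswith line pvHeader then
    (pvFinalize (kept, cur, skip), [line], pvSkipA line excluded_exts)
  else (kept, cur ++ [line], skip)

def filter_excluded_files (diff : String) (excluded_exts : List String) : String :=
  if PySem.Str.strip diff = "" then diff
  else
    let lines := PySem.Str.splitlines diff
    PySem.Str.join "\n" (pvFinalize (lines.foldl (pvStepA excluded_exts) ([], [], false))) ++ "\n"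

-- ===== PORT B =====
def pvExcludedB (line : String) (excluded_exts : List String) : Bool :=
  let parts := PySem.Str.split₀ line
  if parts.length < 4 then false
  else
    let file_a := PySem.Str.slice ((PySem.List.pyGet? parts 2).getD "") (some 2) none
    let file_b := PySem.Str.slice ((PySem.List.pyGet? parts 3).getD "") (some 2) none
    excluded_exts.any (fun ext => PySem.Str.endswith file_a ext || PySem.Str.endswith file_b ext)

def pvFilterB (excluded_exts : List String) : List String → Bool → List String
  | [], _ => []
  | line :: rest, keeping =>
    let keeping := if PySem.Str.startswith line pvHeader then !pvExcludedB line excluded_exts else keeping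
    (if keeping then [line] else []) ++ pvFilterB excluded_exts rest keeping

def filter_excluded_files_alt (diff : String) (excluded_exts : List String) : String :=
  if PySem.Str.strip diff = "" then diff
  else PySem.Str.join "\n" (pvFilterB excluded_exts (PySem.Str.splitlines diff) true) ++ "\n"

-- ===== PRECONDITION & SPEC =====
def Spec_filter_excluded_files (diff : String) (excluded_exts : List String) (out : String) : Prop := out = filter_excluded_files_alt diff excluded_exts
instance (diff : String) (excluded_exts : List String) (out : String) : Decidable (Spec_filter_excluded_files diff excluded_exts out) := by unfold Spec_filter_excluded_files; infer_instance

-- ===== CLAIM (what is proved, stated in full; the proofs are below) =====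
def Claim_equal_filter_excluded_files : Prop := ∀ (diff : String) (excluded_exts : List String), Dom_filter_excluded_files diff excluded_exts → Spec_filter_excluded_files diff excluded_exts (filter_excluded_files diff excluded_exts)

-- ===== LEMMAS AND PROOFS =====

theorem pvFoldlOr (p : String → Bool) (exts : List String) (b : Bool) :
    exts.foldl (fun sk e => sk || p e) b = (b || exts.any p) := by
  induction exts generalizing b with
  | nil => simp
  | cons e t ih => simp [List.foldl, ih, Bool.or_assoc]

theorem pvSkip_eq (line : String) (exts : List String) :
    pvSkipA line exts = pvExcludedB line exts := by
  unfold pvSkipA pvExcludedB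
  simp only [pvFoldlOr, Bool.false_or]
  split_ifs with h1 h2 <;> first | rfl | omega

theorem pvInvariant (exts : List String) (rest : List String)
    (kept cur : List String) (skip : Bool) :
    pvFinalize (rest.foldl (pvStepA exts) (kept, cur, skip)) =
      kept ++ (if skip then [] else cur) ++ pvFilterB exts rest (!skip) := by
  induction rest generalizing kept cur skip with
  | nil =>
    simp only [List.foldl, pvFinalize, pvFilterB, List.append_nil]
    cases skip <;> cases cur <;> simp
  | cons line rest ih =>
    simp only [List.foldl, pvStepA, pvFilterB]
    by_cases hh : PySem.Str.startswith line pvHeader = true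
    · simp only [hh, if_pos, ih, pvSkip_eq]
      have hfin : pvFinalize (kept, cur, skip) = kept ++ (if skip then [] else cur) := by
        cases skip <;> cases cur <;> simp [pvFinalize]
      rw [hfin]
      cases h : pvExcludedB line exts <;> simp
    · simp only [hh, if_neg, Bool.not_eq_true] at *
      simp only [ih]
      cases skip <;> simp

-- ===== VERDICT (by name: the statement is the Claim_ definition above) =====
theorem filter_excluded_files_spec : Claim_equal_filter_excluded_files := by
  intro diff exts _
  unfold Spec_filter_excluded_files filter_excluded_files filter_excluded_files_alt
  by_cases h : PySem.Str.strip diff = ""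
  · simp [h]
  · simp only [h, if_false]
    rw [pvInvariant]
    simp
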